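-- pv_equiv track=rewrite | github.com/JacquiLJQ/sca | src/solver/spice_runner.py | _inject_analysis
-- ===== SOURCE A (Python) =====
-- def _inject_analysis(netlist: str, analysis: str) -> str:
--     """Insert .{analysis} immediately before the last .end line."""
--     lines = netlist.splitlines()
--     for i in range(len(lines) - 1, -1, -1):
--         if lines[i].strip().lower() == ".end":
--             lines.insert(i, f".{analysis}")
--             return "\n".join(lines)
--     raise ValueError(
--         "Netlist does not contain a '.end' line; cannot inject analysis. "
--         "Well-formed netlists must end with .end."
--     )
-- ===== SOURCE B (Python) =====
-- def _inject_analysis(netlist: str, analysis: str) -> str: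
--     """Insert .{analysis} immediately before the last .end line."""
--     rev = []
--     injected = False
--     for line in reversed(netlist.splitlines()):
--         rev.append(line)
--         if not injected and line.strip().lower() == ".end":
--             rev.append(f".{analysis}")
--             injected = True
--     if not injected:
--         raise ValueError(
--             "Netlist does not contain a '.end' line; cannot inject analysis. "
--             "Well-formed netlists must end with .end."
--         )
--     return "\n".join(reversed(rev))
-- ===== Notes on version B (the rewrite author's own statement) =====
-- stated objective: alternative
-- what changed: Instead of scanning indices and inserting into the line list, B builds a new output list back-to-front in one pass over reversed(lines) with an 'injected' flag (appending the analysis line right after the first '.end' seen from the back), then reverses it to join; no indices, no list.insert, no early return.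
import Mathlib
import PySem

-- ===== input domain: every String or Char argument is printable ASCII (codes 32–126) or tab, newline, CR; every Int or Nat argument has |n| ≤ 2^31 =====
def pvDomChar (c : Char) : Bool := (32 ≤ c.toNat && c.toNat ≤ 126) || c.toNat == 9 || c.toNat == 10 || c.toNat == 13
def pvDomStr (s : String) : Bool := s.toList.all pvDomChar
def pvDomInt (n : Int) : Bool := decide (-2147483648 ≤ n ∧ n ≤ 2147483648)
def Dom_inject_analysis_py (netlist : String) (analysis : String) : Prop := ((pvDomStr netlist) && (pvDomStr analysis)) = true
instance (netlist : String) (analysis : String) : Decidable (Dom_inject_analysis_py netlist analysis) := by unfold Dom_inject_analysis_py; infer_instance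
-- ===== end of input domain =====

-- B replaces A's index scan + in-place list.insert by building the output list
-- back-to-front in one flagged pass over the reversed lines (alternative decomposition).

-- ===== PORT A =====
-- A's reverse for-loop with early return: recursion counting i+1 down; at fuel j+1 it
-- inspects lines[j] (range(len-1,-1,-1)), inserts and returns on a hit.
def injectLoopA (lines : List String) (analysis : String) : Nat → Option String
  | 0 => none
  | j+1 =>
    if PySem.Str.lower (PySem.Str.strip (lines.getD j "")) == ".end" then
      some (PySem.Str.join "\n" (PySem.List.insert lines (j : Int) ("." ++ analysis)))
    else injectLoopA lines analysis j

def inject_analysis_py (netlist : String) (analysis : String) : String :=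
  let lines := PySem.Str.splitlines netlist
  -- the none case is Python's ValueError, excluded by Pre_
  (injectLoopA lines analysis lines.length).getD ""

-- ===== PORT B =====
-- B's loop body: append the line to the accumulator; right after the first '.end'
-- seen (from the back) also append the analysis line and set the flag.
def stepB (analysis : String) (st : List String × Bool) (line : String) : List String × Bool :=
  let acc := st.1 ++ [line]
  if !st.2 && (PySem.Str.lower (PySem.Str.strip line) == ".end") then
    (acc ++ ["." ++ analysis], true)
  else (acc, st.2)

def inject_analysis_py_alt (netlist : String) (analysis : String) : String :=
  let st := (PySem.Str.splitlines netlist).reverse.foldl (stepB analysis) ([], false)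
  if st.2 then PySem.Str.join "\n" st.1.reverse
  else ""  -- Python B raises ValueError here, excluded by Pre_

-- ===== PRECONDITION & SPEC =====
-- Pre_ excludes exactly the netlists with no '.end' line (after strip/lower), on which A raises ValueError.
def Pre_inject_analysis_py (netlist : String) (analysis : String) : Prop :=
  (PySem.Str.splitlines netlist).any (fun ln => PySem.Str.lower (PySem.Str.strip ln) == ".end") = true
instance (netlist : String) (analysis : String) : Decidable (Pre_inject_analysis_py netlist analysis) := by
  unfold Pre_inject_analysis_py; infer_instance

def pvWitness_inject_analysis_py : String × String := ("r1 1 0 1k\n.end", "tran 1n 1u")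

def Spec_inject_analysis_py (netlist : String) (analysis : String) (out : String) : Prop :=
  out = inject_analysis_py_alt netlist analysis
instance (netlist : String) (analysis : String) (out : String) : Decidable (Spec_inject_analysis_py netlist analysis out) := by
  unfold Spec_inject_analysis_py; infer_instance

-- ===== CLAIM (what is proved, stated in full; the proofs are below) =====
def Claim_equal_inject_analysis_py : Prop := ∀ (netlist : String) (analysis : String), Dom_inject_analysis_py netlist analysis → Pre_inject_analysis_py netlist analysis → Spec_inject_analysis_py netlist analysis (inject_analysis_py netlist analysis)

-- ===== LEMMAS AND PROOFS =====

-- the last index k < n with lines[k].strip().lower() == ".end"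
def lastHit (lines : List String) : Nat → Option Nat
  | 0 => none
  | n+1 =>
    if PySem.Str.lower (PySem.Str.strip (lines.getD n "")) == ".end" then some n
    else lastHit lines n

theorem lastHit_lt (lines : List String) (n k : Nat) (h : lastHit lines n = some k) : k < n := by
  induction n with
  | zero => simp [lastHit] at h
  | succ m ih =>
    simp only [lastHit] at h
    split at h
    · simp only [Option.some.injEq] at h; omega
    · exact Nat.lt_succ_of_lt (ih h)

theorem injectLoopA_eq (lines : List String) (analysis : String) (n : Nat) :
    injectLoopA lines analysis n
      = (lastHit lines n).map
          (fun k => PySem.Str.join "\n" (PySem.List.insert lines (k : Int) ("." ++ analysis))) := by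
  induction n with
  | zero => rfl
  | succ m ih =>
    simp only [injectLoopA, lastHit]
    split <;> simp [ih]

theorem lastHit_append (lines : List String) (x : String) (n : Nat) (hn : n ≤ lines.length) :
    lastHit (lines ++ [x]) n = lastHit lines n := by
  induction n with
  | zero => rfl
  | succ m ih =>
    have hm : m < lines.length := hn
    simp only [lastHit, List.getD_append _ _ _ _ hm, ih (Nat.le_of_lt hm)]

-- once the flag is set, the loop just appends the remaining lines
theorem foldB_injected (analysis : String) (r acc : List String) :
    r.foldl (stepB analysis) (acc, true) = (acc ++ r, true) := by
  induction r generalizing acc with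
  | nil => simp
  | cons x xs ih => simp [stepB, ih]

-- characterisation of B's loop from the un-injected state, via lastHit on the
-- original (un-reversed) line list
theorem foldB_eq (analysis : String) (lines : List String) (acc : List String) :
    lines.reverse.foldl (stepB analysis) (acc, false)
      = match lastHit lines lines.length with
        | some k => (acc ++ (PySem.List.insert lines (k : Int) ("." ++ analysis)).reverse, true)
        | none => (acc ++ lines.reverse, false) := by
  induction lines using List.reverseRecOn generalizing acc with
  | nil => simp [lastHit]
  | append_singleton l x ih =>
    have hlen : (l ++ [x]).length = l.length + 1 := by simp
    rw [hlen]
    by_cases hx : PySem.Str.lower (PySem.Str.strip x) = ".end"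
    · have h1 : lastHit (l ++ [x]) (l.length + 1) = some l.length := by
        simp [lastHit, hx]
      rw [h1]
      have h2 : PySem.List.insert (l ++ [x]) ((l.length : Nat) : Int) ("." ++ analysis)
          = l ++ [("." ++ analysis), x] := by
        rw [PySem.List.insert_natCast _ _ _ (by simp)]
        simp
      have hstep : stepB analysis (acc, false) x = (acc ++ [x] ++ ["." ++ analysis], true) := by
        simp [stepB, hx]
      simp only [List.reverse_append, List.reverse_cons, List.reverse_nil, List.nil_append,
        List.singleton_append, List.foldl_cons]
      rw [hstep, foldB_injected, h2]
      simp
    · have h1 : lastHit (l ++ [x]) (l.length + 1) = lastHit l l.length := by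
        simp [lastHit, hx, lastHit_append l x l.length (Nat.le_refl _)]
      rw [h1]
      simp only [List.reverse_append, List.reverse_cons, List.reverse_nil, List.nil_append,
        List.singleton_append, List.foldl_cons, stepB]
      rw [if_neg (by simp [hx]), ih (acc ++ [x])]
      cases h : lastHit l l.length with
      | none => simp
      | some k =>
        have hk : k < l.length := lastHit_lt _ _ _ h
        have h2 : PySem.List.insert (l ++ [x]) ((k : Nat) : Int) ("." ++ analysis)
            = PySem.List.insert l ((k : Nat) : Int) ("." ++ analysis) ++ [x] := by
          rw [PySem.List.insert_natCast _ _ _ (by simp; omega),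
            PySem.List.insert_natCast _ _ _ (Nat.le_of_lt hk)]
          simp [List.take_append_of_le_length (Nat.le_of_lt hk),
            List.drop_append_of_le_length (Nat.le_of_lt hk)]
        simp [h2]

theorem ports_agree (netlist analysis : String) :
    inject_analysis_py netlist analysis = inject_analysis_py_alt netlist analysis := by
  show (injectLoopA (PySem.Str.splitlines netlist) analysis (PySem.Str.splitlines netlist).length).getD ""
      = (let st := (PySem.Str.splitlines netlist).reverse.foldl (stepB analysis) ([], false)
         if st.2 then PySem.Str.join "\n" st.1.reverse else "")
  rw [injectLoopA_eq, foldB_eq]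
  cases h : lastHit (PySem.Str.splitlines netlist) (PySem.Str.splitlines netlist).length with
  | none => simp
  | some k => simp

-- ===== VERDICT (by name: the statement is the Claim_ definition above) =====
theorem inject_analysis_py_spec : Claim_equal_inject_analysis_py := by
  intro netlist analysis _ _
  unfold Spec_inject_analysis_py
  exact ports_agree netlist analysis
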